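-- pv_equiv track=rewrite | github.com/iafisher/research | 2024/q2/rc/found-poems/poems.py | make_feet
-- ===== SOURCE A (Python) =====
-- def make_feet(stresses):
--     r = []
--
--     start = 0
--     for i, stress in enumerate(stresses):
--         if stress == 1 and start != i:
--             r.append(stresses[start : (i + 1)])
--             start = i + 1
--
--     if start < len(stresses) - 1:
--         r.append(stresses[start:])
--
--     return r
-- ===== SOURCE B (Python) =====
-- def make_feet(stresses):
--     # Pass 1: split into groups ending right after each stressed syllable.
--     groups, g = [], []
--     for s in stresses:
--         g.append(s)
--         if s == 1:
--             groups.append(g)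
--             g = []
--     # Pass 2: merge/emit groups, carrying any too-short group into the next.
--     feet, carry = [], []
--     for grp in groups:
--         carry = carry + grp
--         if len(carry) > 1:
--             feet.append(carry)
--             carry = []
--     tail = carry + g
--     if len(tail) > 1:
--         feet.append(tail)
--     return feet
-- ===== Notes on version B (the rewrite author's own statement) =====
-- stated objective: alternative
-- what changed: A scans with an index pointer and re-slices the input list between stress positions; B never indexes or slices: a first pass splits the list into groups cut after every stressed syllable, and a second pass merges each too-short group into its successor and drops a too-short tail.
import Mathlib
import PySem

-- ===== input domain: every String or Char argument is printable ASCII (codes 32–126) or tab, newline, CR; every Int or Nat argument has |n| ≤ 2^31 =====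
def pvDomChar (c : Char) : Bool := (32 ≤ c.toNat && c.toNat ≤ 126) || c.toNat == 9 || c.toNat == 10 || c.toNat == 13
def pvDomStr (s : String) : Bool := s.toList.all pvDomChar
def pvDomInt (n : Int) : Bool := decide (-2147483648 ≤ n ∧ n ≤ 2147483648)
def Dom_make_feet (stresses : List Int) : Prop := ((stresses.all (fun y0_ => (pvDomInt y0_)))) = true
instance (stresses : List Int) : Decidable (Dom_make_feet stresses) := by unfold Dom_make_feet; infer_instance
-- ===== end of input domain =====

-- B replaces A's index-pointer slicing with a two-pass split-after-stress /
-- merge-short-groups decomposition (alternative, same cost).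

-- ===== PORT A =====
def make_feet (stresses : List Int) : List (List Int) :=
  let st := (PySem.List.enumerate stresses 0).foldl
    (fun (acc : List (List Int) × Int) p =>
      if p.2 = 1 ∧ acc.2 ≠ p.1 then
        (acc.1 ++ [PySem.List.slice stresses (some acc.2) (some (p.1 + 1))], p.1 + 1)
      else acc) ([], 0)
  if st.2 < (stresses.length : Int) - 1 then
    st.1 ++ [PySem.List.slice stresses (some st.2) none]
  else st.1

-- ===== PORT B =====
def make_feet_alt (stresses : List Int) : List (List Int) :=
  let p := stresses.foldl
    (fun (st : List (List Int) × List Int) s =>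
      let g := st.2 ++ [s]
      if s = 1 then (st.1 ++ [g], ([] : List Int)) else (st.1, g)) ([], [])
  let m := p.1.foldl
    (fun (st : List (List Int) × List Int) grp =>
      let carry := st.2 ++ grp
      if 1 < carry.length then (st.1 ++ [carry], ([] : List Int)) else (st.1, carry)) ([], [])
  let tail := m.2 ++ p.2
  if 1 < tail.length then m.1 ++ [tail] else m.1

-- ===== PRECONDITION & SPEC =====
def Spec_make_feet (stresses : List Int) (out : List (List Int)) : Prop := out = make_feet_alt stresses
instance (stresses : List Int) (out : List (List Int)) : Decidable (Spec_make_feet stresses out) := by unfold Spec_make_feet; infer_instance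

-- ===== CLAIM (what is proved, stated in full; the proofs are below) =====
def Claim_equal_make_feet : Prop := ∀ (stresses : List Int), Dom_make_feet stresses → Spec_make_feet stresses (make_feet stresses)

-- ===== LEMMAS AND PROOFS =====

/-- Common reference recursion: scan with a buffer `acc`, emit `acc ++ [s]` whenever a
stressed syllable `s = 1` closes a nonempty buffer; return (feet, final buffer). -/
def runFeet (acc : List Int) : List Int → List (List Int) × List Int
  | [] => ([], acc)
  | s :: t =>
    if s = 1 ∧ acc ≠ [] then
      ((acc ++ [s]) :: (runFeet [] t).1, (runFeet [] t).2)
    else runFeet (acc ++ [s]) t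

/-- Recursive form of B's first pass, with the open buffer `g` threaded. -/
def splitR (g : List Int) : List Int → List (List Int) × List Int
  | [] => ([], g)
  | s :: t =>
    if s = 1 then ((g ++ [s]) :: (splitR [] t).1, (splitR [] t).2)
    else splitR (g ++ [s]) t

/-- Recursive form of B's second pass. -/
def mergeR (carry : List Int) : List (List Int) → List (List Int) × List Int
  | [] => ([], carry)
  | grp :: gs =>
    if 1 < (carry ++ grp).length then
      ((carry ++ grp) :: (mergeR [] gs).1, (mergeR [] gs).2)
    else mergeR (carry ++ grp) gs

theorem runFeet_nil (acc : List Int) : runFeet acc [] = ([], acc) := by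
  simp only [runFeet]

theorem runFeet_cons (acc : List Int) (s : Int) (t : List Int) :
    runFeet acc (s :: t)
      = if s = 1 ∧ acc ≠ [] then ((acc ++ [s]) :: (runFeet [] t).1, (runFeet [] t).2)
        else runFeet (acc ++ [s]) t := by
  simp only [runFeet]

theorem splitR_nil (g : List Int) : splitR g [] = ([], g) := by
  simp only [splitR]

theorem splitR_cons (g : List Int) (s : Int) (t : List Int) :
    splitR g (s :: t)
      = if s = 1 then ((g ++ [s]) :: (splitR [] t).1, (splitR [] t).2)
        else splitR (g ++ [s]) t := by
  simp only [splitR]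

theorem mergeR_nil (carry : List Int) : mergeR carry [] = ([], carry) := by
  simp only [mergeR]

theorem mergeR_cons (carry grp : List Int) (gs : List (List Int)) :
    mergeR carry (grp :: gs)
      = if 1 < (carry ++ grp).length then ((carry ++ grp) :: (mergeR [] gs).1, (mergeR [] gs).2)
        else mergeR (carry ++ grp) gs := by
  simp only [mergeR]

theorem split_fold (t : List Int) : ∀ (groups : List (List Int)) (g : List Int),
    t.foldl (fun (st : List (List Int) × List Int) s =>
        let g := st.2 ++ [s]
        if s = 1 then (st.1 ++ [g], ([] : List Int)) else (st.1, g)) (groups, g)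
      = (groups ++ (splitR g t).1, (splitR g t).2) := by
  induction t with
  | nil => intro groups g; simp [splitR]
  | cons s t ih =>
    intro groups g
    simp only [List.foldl_cons, splitR]
    by_cases hs : s = 1
    · rw [if_pos hs, if_pos hs, ih]; simp
    · rw [if_neg hs, if_neg hs, ih]

theorem merge_fold (gs : List (List Int)) : ∀ (feet : List (List Int)) (carry : List Int),
    gs.foldl (fun (st : List (List Int) × List Int) grp =>
        let carry := st.2 ++ grp
        if 1 < carry.length then (st.1 ++ [carry], ([] : List Int)) else (st.1, carry)) (feet, carry)
      = (feet ++ (mergeR carry gs).1, (mergeR carry gs).2) := by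
  induction gs with
  | nil => intro feet carry; simp [mergeR]
  | cons grp gs ih =>
    intro feet carry
    simp only [List.foldl_cons, mergeR]
    by_cases h : 1 < (carry ++ grp).length
    · rw [if_pos h, if_pos h, ih]; simp
    · rw [if_neg h, if_neg h, ih]

/-- Composing B's two passes is the reference recursion. -/
theorem split_merge_eq_run (t : List Int) : ∀ (g carry : List Int),
    ((mergeR carry (splitR g t).1).1, (mergeR carry (splitR g t).1).2 ++ (splitR g t).2)
      = runFeet (carry ++ g) t := by
  induction t with
  | nil => intro g carry; simp [splitR_nil, mergeR_nil, runFeet_nil]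
  | cons s t ih =>
    intro g carry
    rw [splitR_cons, runFeet_cons]
    by_cases hs : s = 1
    · rw [if_pos hs]
      dsimp only
      rw [mergeR_cons]
      by_cases hne : carry ++ g = []
      · have hc : carry = [] := by cases carry <;> simp_all
        have hg : g = [] := by cases g <;> simp_all
        subst hc; subst hg
        have h1 := ih [] [s]
        simp only [List.append_nil] at h1
        simpa using h1
      · have hl : 0 < (carry ++ g).length := List.length_pos_iff.mpr hne
        have hcond : 1 < (carry ++ (g ++ [s])).length := by
          simp only [List.length_append, List.length_cons, List.length_nil] at hl ⊢
          omega
        have h1 := ih [] []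
        simp only [List.append_nil] at h1
        have e1 := congrArg Prod.fst h1
        have e2 := congrArg Prod.snd h1
        try dsimp only at e1 e2
        simp only [if_pos hcond, if_pos (show s = 1 ∧ carry ++ g ≠ [] from ⟨hs, hne⟩)]
        rw [← List.append_assoc, e1, e2]
    · rw [if_neg hs]
      rw [if_neg (show ¬ (s = 1 ∧ carry ++ g ≠ []) from fun hh => hs hh.1)]
      have h1 := ih (g ++ [s]) carry
      rw [← List.append_assoc] at h1
      exact h1

/-- The final buffer of the reference recursion is a suffix of the input. -/
theorem run_suffix (t : List Int) : ∀ acc : List Int, (runFeet acc t).2 <:+ acc ++ t := by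
  induction t with
  | nil => intro acc; simp [runFeet_nil]
  | cons s t ih =>
    intro acc
    rw [runFeet_cons]
    by_cases h : s = 1 ∧ acc ≠ []
    · rw [if_pos h]
      exact (by simpa using ih [] : (runFeet [] t).2 <:+ t).trans ⟨acc ++ [s], by simp⟩
    · rw [if_neg h]
      simpa [List.append_assoc] using ih (acc ++ [s])

/-- A's loop, generalized: fold over the enumeration of the suffix `t` at offset
`pre.length`, with the slice pointer `start` inside the already-seen prefix `pre`. -/
theorem A_loop (xs : List Int) (t : List Int) : ∀ (pre : List Int) (r : List (List Int)) (start : Nat),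
    xs = pre ++ t → start ≤ pre.length →
    (PySem.List.enumerate t (pre.length : Int)).foldl
      (fun (acc : List (List Int) × Int) p =>
        if p.2 = 1 ∧ acc.2 ≠ p.1 then
          (acc.1 ++ [PySem.List.slice xs (some acc.2) (some (p.1 + 1))], p.1 + 1)
        else acc) (r, (start : Int))
    = (r ++ (runFeet (pre.drop start) t).1,
       ((xs.length - (runFeet (pre.drop start) t).2.length : Nat) : Int)) := by
  induction t with
  | nil =>
    intro pre r start hxs hle
    subst hxs
    simp only [PySem.List.enumerate_nil, List.foldl_nil, runFeet_nil, List.append_nil]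
    have h1 : pre.length - (pre.drop start).length = start := by
      simp only [List.length_drop]; omega
    rw [h1]
  | cons s t ih =>
    intro pre r start hxs hle
    rw [PySem.List.enumerate_cons]
    simp only [List.foldl_cons]
    by_cases hc : s = 1 ∧ ((start : Int) ≠ ((pre.length : Nat) : Int))
    · rw [if_pos hc]
      obtain ⟨hs1, hne⟩ := hc
      have hlt : start < pre.length := lt_of_le_of_ne hle (by exact_mod_cast hne)
      have hIH := ih (pre ++ [s])
        (r ++ [PySem.List.slice xs (some ((start : Nat) : Int)) (some (((pre.length : Nat) : Int) + 1))])
        (pre ++ [s]).length (by simpa using hxs) (le_refl _)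
      rw [List.drop_length] at hIH
      simp only [List.length_append, List.length_cons, List.length_nil, Nat.zero_add,
        Nat.cast_add, Nat.cast_one] at hIH
      rw [hIH]
      have hslice : PySem.List.slice xs (some ((start : Nat) : Int))
          (some (((pre.length : Nat) : Int) + 1)) = pre.drop start ++ [s] := by
        rw [show (((pre.length : Nat) : Int) + 1) = ((pre.length + 1 : Nat) : Int) by push_cast; ring]
        rw [PySem.List.slice_natCast, hxs, List.drop_append_of_le_length hle]
        rw [show pre.drop start ++ s :: t = (pre.drop start ++ [s]) ++ t from by simp]
        apply List.take_left'
        simp only [List.length_append, List.length_drop, List.length_cons, List.length_nil]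
        omega
      have hne2 : pre.drop start ≠ [] := by
        intro h0
        have hl0 : (pre.drop start).length = 0 := by rw [h0]; rfl
        rw [List.length_drop] at hl0
        omega
      rw [hslice, runFeet_cons, if_pos ⟨hs1, hne2⟩]
      dsimp only
      simp [List.append_assoc]
    · rw [if_neg hc]
      have hle' : start ≤ (pre ++ [s]).length := le_trans hle (by simp)
      have hIH := ih (pre ++ [s]) r start (by simpa using hxs) hle'
      simp only [List.length_append, List.length_cons, List.length_nil, Nat.zero_add,
        Nat.cast_add, Nat.cast_one] at hIH
      rw [hIH, List.drop_append_of_le_length hle]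
      have hcond : ¬ (s = 1 ∧ pre.drop start ≠ []) := by
        rintro ⟨h1, hne⟩
        apply hc
        refine ⟨h1, ?_⟩
        have hpos : 0 < (pre.drop start).length := List.length_pos_iff.mpr hne
        rw [List.length_drop] at hpos
        intro hcast
        have : start = pre.length := by exact_mod_cast hcast
        omega
      rw [runFeet_cons, if_neg hcond]

/-- A in terms of the reference recursion. -/
theorem make_feet_eq_run (stresses : List Int) :
    make_feet stresses
      = (if 1 < (runFeet [] stresses).2.length
         then (runFeet [] stresses).1 ++ [(runFeet [] stresses).2]
         else (runFeet [] stresses).1) := by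
  have hsf : (runFeet [] stresses).2 <:+ stresses := by
    simpa using run_suffix stresses []
  have hble : (runFeet [] stresses).2.length ≤ stresses.length := hsf.length_le
  have hdrop : stresses.drop (stresses.length - (runFeet [] stresses).2.length)
      = (runFeet [] stresses).2 := (List.suffix_iff_eq_drop.mp hsf).symm
  have h := A_loop stresses stresses [] [] 0 (by simp) (by simp)
  simp only [List.length_nil, Nat.cast_zero, List.drop_nil,
    List.nil_append] at h
  unfold make_feet
  dsimp only
  rw [h]
  dsimp only
  rw [PySem.List.slice_from_natCast, hdrop]
  split_ifs <;> first | rfl | (exfalso; omega)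

/-- B in terms of the reference recursion. -/
theorem make_feet_alt_eq_run (stresses : List Int) :
    make_feet_alt stresses
      = (if 1 < (runFeet [] stresses).2.length
         then (runFeet [] stresses).1 ++ [(runFeet [] stresses).2]
         else (runFeet [] stresses).1) := by
  have h := split_merge_eq_run stresses [] []
  simp only [List.append_nil] at h
  have e1 := congrArg Prod.fst h
  have e2 := congrArg Prod.snd h
  dsimp only at e1 e2
  unfold make_feet_alt
  rw [split_fold]
  simp only [List.nil_append]
  rw [merge_fold]
  simp only [List.nil_append]
  rw [e2, e1]

-- ===== VERDICT (by name: the statement is the Claim_ definition above) =====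
theorem make_feet_spec : Claim_equal_make_feet := by
  intro stresses _
  unfold Spec_make_feet
  rw [make_feet_eq_run, make_feet_alt_eq_run]
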